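-- pv_equiv track=rewrite | github.com/Jasmineprogrammiert/DSA | C27_Two_Pointers/P27.17.py | prefix_suffix_swap
-- ===== SOURCE A (Python) =====
-- def prefix_suffix_swap(arr):
--     if not arr: return
--
--     n = len(arr)
--     l, r = 0, n - 1
--
--     # Reverse the whole array
--     while l < r:
--         arr[l], arr[r] = arr[r], arr[l]
--         l += 1
--         r -= 1
--
--     # Reverse the last n/3 elements
--     l, r = 2 * n // 3, n - 1
--     while l < r:
--         arr[l], arr[r] = arr[r], arr[l]
--         l += 1
--         r -= 1
--
--     # Reverse the first 2n/3 elements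
--     l, r = 0, (2 * n // 3) - 1
--     while l < r:
--         arr[l], arr[r] = arr[r], arr[l]
--         l += 1
--         r -= 1
--
--     return arr
-- ===== SOURCE B (Python) =====
-- def prefix_suffix_swap(arr):
--     if not arr: return
--     k = len(arr) - 2 * len(arr) // 3
--     arr[:] = arr[k:] + arr[:k]
--     return arr
-- ===== Notes on version B (the rewrite author's own statement) =====
-- stated objective: simpler
-- what changed: Replaces the three in-place reversal loops with a single left rotation by k = n - 2*n//3, assigned via one slice concatenation arr[:] = arr[k:] + arr[:k].
-- outside the precondition, e.g. on prefix_suffix_swap([]): A returns None, B returns None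
import Mathlib
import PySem

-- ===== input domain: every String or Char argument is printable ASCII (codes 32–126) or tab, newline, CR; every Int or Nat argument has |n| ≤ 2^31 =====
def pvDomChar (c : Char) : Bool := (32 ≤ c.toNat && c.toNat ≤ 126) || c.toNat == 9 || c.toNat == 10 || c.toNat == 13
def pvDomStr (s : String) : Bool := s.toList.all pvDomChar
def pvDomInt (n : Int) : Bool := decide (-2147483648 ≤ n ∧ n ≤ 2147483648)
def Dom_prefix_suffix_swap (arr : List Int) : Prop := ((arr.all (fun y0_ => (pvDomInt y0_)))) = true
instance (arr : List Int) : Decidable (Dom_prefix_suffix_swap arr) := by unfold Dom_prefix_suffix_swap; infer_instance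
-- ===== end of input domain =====

-- B replaces A's three in-place reversal passes by a single left-rotation slice
-- concatenation; objective: simpler. Both Pythons mutate arr in place and return it;
-- the equivalence proved here is about the RETURN value only.


-- ===== PORT A =====
-- arr[l], arr[r] = arr[r], arr[l]  (both indices are in range whenever the loop body
-- runs, so getD with default 0 is exact here)
def pvSwap (a : List Int) (l r : Nat) : List Int :=
  (a.set l (a.getD r 0)).set r (a.getD l 0)

-- while l < r: swap; l += 1; r -= 1
def pvRevLoop (a : List Int) (l r : Nat) : List Int :=
  if l < r then pvRevLoop (pvSwap a l r) (l + 1) (r - 1) else a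
termination_by r - l
decreasing_by omega

def prefix_suffix_swap (arr : List Int) : List Int :=
  if arr = [] then [] else   -- Python returns None here (excluded by Pre_)
    let n := arr.length
    let a1 := pvRevLoop arr 0 (n - 1)
    let a2 := pvRevLoop a1 (2 * n / 3) (n - 1)
    pvRevLoop a2 0 (2 * n / 3 - 1)

-- ===== PORT B =====
def prefix_suffix_swap_alt (arr : List Int) : List Int :=
  if arr = [] then [] else   -- Python returns None here (excluded by Pre_)
    let k := arr.length - 2 * arr.length / 3
    arr.drop k ++ arr.take k

-- ===== PRECONDITION & SPEC =====
-- Pre_ excludes only the empty list, on which both Pythons return None (not a list value).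
def Pre_prefix_suffix_swap (arr : List Int) : Prop := arr ≠ []
instance (arr : List Int) : Decidable (Pre_prefix_suffix_swap arr) := by unfold Pre_prefix_suffix_swap; infer_instance
def pvWitness_prefix_suffix_swap : List Int := [1, 2, 3]

def Spec_prefix_suffix_swap (arr : List Int) (out : List Int) : Prop := out = prefix_suffix_swap_alt arr
instance (arr : List Int) (out : List Int) : Decidable (Spec_prefix_suffix_swap arr out) := by unfold Spec_prefix_suffix_swap; infer_instance

-- ===== CLAIM (what is proved, stated in full; the proofs are below) =====
def Claim_equal_prefix_suffix_swap : Prop := ∀ (arr : List Int), Dom_prefix_suffix_swap arr → Pre_prefix_suffix_swap arr → Spec_prefix_suffix_swap arr (prefix_suffix_swap arr)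

-- ===== LEMMAS AND PROOFS =====

theorem pvSwap_length (a : List Int) (l r : Nat) : (pvSwap a l r).length = a.length := by
  simp [pvSwap]

theorem pvRevLoop_length (a : List Int) (l r : Nat) : (pvRevLoop a l r).length = a.length := by
  induction a, l, r using pvRevLoop.induct with
  | case1 a l r h ih => rw [pvRevLoop, if_pos h, ih, pvSwap_length]
  | case2 a l r h => rw [pvRevLoop, if_neg h]

theorem getD_set (a : List Int) (j : Nat) (x : Int) (i : Nat) :
    (a.set j x).getD i 0 = if j = i ∧ j < a.length then x else a.getD i 0 := by
  simp only [List.getD, List.getElem?_set]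
  by_cases h1 : j = i
  · subst h1
    by_cases h2 : j < a.length
    · simp [h2]
    · simp [h2]
  · simp [h1]

theorem pvSwap_getD (a : List Int) (l r : Nat) (hl : l < a.length) (hr : r < a.length) (j : Nat) :
    (pvSwap a l r).getD j 0 =
      if j = l then a.getD r 0 else if j = r then a.getD l 0 else a.getD j 0 := by
  unfold pvSwap
  rw [getD_set, getD_set, List.length_set]
  split_ifs <;> first | rfl | omega | (congr 1; omega)

theorem pvRevLoop_getD (a : List Int) (l r : Nat) (hr : r < a.length) (i : Nat) :
    (pvRevLoop a l r).getD i 0 =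
      if l ≤ i ∧ i ≤ r then a.getD (l + r - i) 0 else a.getD i 0 := by
  induction a, l, r using pvRevLoop.induct with
  | case2 a l r h =>
    rw [pvRevLoop, if_neg h]
    split_ifs with hc
    · have : i = l ∧ i = r := by omega
      obtain ⟨rfl, h2⟩ := this
      congr 1
      omega
    · rfl
  | case1 a l r h ih =>
    rw [pvRevLoop, if_pos h]
    have hr' : r - 1 < (pvSwap a l r).length := by rw [pvSwap_length]; omega
    rw [ih hr']
    have hl : l < a.length := by omega
    rw [pvSwap_getD a l r hl hr i, pvSwap_getD a l r hl hr (l + 1 + (r - 1) - i)]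
    split_ifs <;> first | rfl | omega | (congr 1; omega)

theorem prefix_suffix_swap_eq (arr : List Int) (h : arr ≠ []) :
    prefix_suffix_swap arr = prefix_suffix_swap_alt arr := by
  unfold prefix_suffix_swap prefix_suffix_swap_alt
  rw [if_neg h, if_neg h]
  set n := arr.length with hn
  have hn1 : 1 ≤ n := by
    cases arr with
    | nil => exact absurd rfl h
    | cons x xs => simp [hn]
  set m := 2 * n / 3 with hm
  have hmn : m ≤ n := by omega
  set a1 := pvRevLoop arr 0 (n - 1) with ha1
  set a2 := pvRevLoop a1 m (n - 1) with ha2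
  have hlen1 : a1.length = n := by rw [ha1, pvRevLoop_length]
  have hlen2 : a2.length = n := by rw [ha2, pvRevLoop_length, hlen1]
  apply List.ext_getElem
  · rw [pvRevLoop_length, hlen2]
    simp only [List.length_append, List.length_drop, List.length_take]
    omega
  · intro i h1 h2
    have hin : i < n := by rw [pvRevLoop_length, hlen2] at h1; exact h1
    rw [← List.getD_eq_getElem _ 0 h1]
    rw [pvRevLoop_getD a2 0 (m - 1) (by omega) i]
    have g2 : ∀ j, a2.getD j 0 =
        if m ≤ j ∧ j ≤ n - 1 then a1.getD (m + (n - 1) - j) 0 else a1.getD j 0 := by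
      intro j
      rw [ha2, pvRevLoop_getD a1 m (n - 1) (by omega) j]
    have g1 : ∀ j, a1.getD j 0 =
        if 0 ≤ j ∧ j ≤ n - 1 then arr.getD (0 + (n - 1) - j) 0 else arr.getD j 0 := by
      intro j
      rw [ha1, pvRevLoop_getD arr 0 (n - 1) (by omega) j]
    rw [List.getElem_append]
    have hdl : (arr.drop (n - m)).length = m := by simp; omega
    split_ifs with hc1 hc2 hc2
    · rw [g2]
      have hno : ¬ (m ≤ 0 + (m - 1) - i ∧ 0 + (m - 1) - i ≤ n - 1) := by omega
      rw [if_neg hno, g1]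
      have hy : 0 ≤ 0 + (m - 1) - i ∧ 0 + (m - 1) - i ≤ n - 1 := by omega
      rw [if_pos hy]
      rw [List.getElem_drop]
      have e : 0 + (n - 1) - (0 + (m - 1) - i) = n - m + i := by omega
      rw [e]
      exact List.getD_eq_getElem _ 0 _
    · have hm0 : m = 0 := by omega
      have hi0 : i = 0 := by omega
      have hn1' : n = 1 := by omega
      rw [g2]
      have hy2 : m ≤ 0 + (m - 1) - i ∧ 0 + (m - 1) - i ≤ n - 1 := by omega
      rw [if_pos hy2, g1]
      have hy1 : 0 ≤ m + (n - 1) - (0 + (m - 1) - i) ∧ m + (n - 1) - (0 + (m - 1) - i) ≤ n - 1 := by omega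
      rw [if_pos hy1]
      rw [List.getElem_take]
      have e : 0 + (n - 1) - (m + (n - 1) - (0 + (m - 1) - i)) = i - (arr.drop (n - m)).length := by omega
      rw [e]
      exact List.getD_eq_getElem _ 0 _
    · omega
    · rw [g2]
      have hy2 : m ≤ i ∧ i ≤ n - 1 := by omega
      rw [if_pos hy2, g1]
      have hy1 : 0 ≤ m + (n - 1) - i ∧ m + (n - 1) - i ≤ n - 1 := by omega
      rw [if_pos hy1]
      rw [List.getElem_take]
      have e : 0 + (n - 1) - (m + (n - 1) - i) = i - (arr.drop (n - m)).length := by omega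
      rw [e]
      exact List.getD_eq_getElem _ 0 _

-- ===== VERDICT (by name: the statement is the Claim_ definition above) =====
theorem prefix_suffix_swap_spec : Claim_equal_prefix_suffix_swap := by
  intro arr _ hpre
  unfold Spec_prefix_suffix_swap
  exact prefix_suffix_swap_eq arr hpre
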